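-- pv_equiv track=rewrite | github.com/Matthew-94/Facility-Design | layoutwise_app.py | build_cv_and_tcr
-- ===== SOURCE A (Python) =====
-- def build_cv_and_tcr(n, rel_matrix, weight_map):
--     cv_matrix = [[0] * n for _ in range(n)]
--     tcr = {i: 0 for i in range(n)}
--     count_A = {i: 0 for i in range(n)}
--
--     for i in range(n):
--         for j in range(n):
--             if i == j:
--                 continue
--             rel = rel_matrix[(i, j)]
--             w = weight_map[rel]
--             cv_matrix[i][j] = w
--             tcr[i] += abs(w)  # lecture rule
--             if rel == 'A':
--                 count_A[i] += 1
--
--     return cv_matrix, tcr, count_A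
-- ===== SOURCE B (Python) =====
-- def build_cv_and_tcr(n, rel_matrix, weight_map):
--     cv_matrix = [[0] * n for _ in range(n)]
--     tcr = {i: 0 for i in range(n)}
--     count_A = {i: 0 for i in range(n)}
--
--     # data-driven: one pass over the relationship dictionary's entries instead of
--     # enumerating all n*n index pairs; irrelevant keys are skipped.
--     for key, rel in rel_matrix.items():
--         if len(key) != 2:
--             continue
--         i, j = key
--         if 0 <= i < n and 0 <= j < n and i != j:
--             w = weight_map[rel]
--             cv_matrix[i][j] = w
--             tcr[i] += abs(w)
--             if rel == 'A':
--                 count_A[i] += 1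
--
--     return cv_matrix, tcr, count_A
-- ===== Notes on version B (the rewrite author's own statement) =====
-- stated objective: alternative
-- what changed: A enumerates all n*n index pairs and looks each one up in the relationship dictionary; B instead makes one data-driven pass over the dictionary's own entries, skipping keys that are not in-range off-diagonal pairs, so the index-pair enumeration and its lookups disappear.
import Mathlib
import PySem

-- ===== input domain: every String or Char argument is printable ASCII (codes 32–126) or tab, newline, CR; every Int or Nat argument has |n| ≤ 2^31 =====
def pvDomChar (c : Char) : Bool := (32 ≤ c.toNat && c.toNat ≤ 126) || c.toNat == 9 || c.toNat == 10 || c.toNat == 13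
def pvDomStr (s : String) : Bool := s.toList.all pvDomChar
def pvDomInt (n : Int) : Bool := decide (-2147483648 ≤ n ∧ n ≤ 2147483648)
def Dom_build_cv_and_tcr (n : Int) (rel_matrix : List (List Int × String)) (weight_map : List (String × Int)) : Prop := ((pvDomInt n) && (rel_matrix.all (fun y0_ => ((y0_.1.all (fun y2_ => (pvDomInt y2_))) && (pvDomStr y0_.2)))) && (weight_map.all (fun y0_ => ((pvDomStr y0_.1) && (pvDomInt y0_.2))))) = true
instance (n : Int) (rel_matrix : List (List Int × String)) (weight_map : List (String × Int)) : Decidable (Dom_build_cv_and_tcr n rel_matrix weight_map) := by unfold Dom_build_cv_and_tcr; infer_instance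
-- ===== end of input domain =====

-- B replaces A's enumeration of all n×n index pairs by one data-driven pass over the
-- relationship dictionary's own entries (alternative decomposition, similar cost).

-- ===== PORT A =====
-- rel_matrix[(i,j)] / weight_map[rel]: dict lookup (first match); total here via a default —
-- Pre_build_cv_and_tcr excludes exactly the inputs where Python raises KeyError.
def pvRelLookup (rel_matrix : List (List Int × String)) (i j : Int) : String :=
  (PySem.Dict.mk rel_matrix).getD [i, j] ""

def pvWeightLookup (weight_map : List (String × Int)) (r : String) : Int :=
  (PySem.Dict.mk weight_map).getD r 0

-- literal port of A: init cv_matrix/tcr/count_A, then one fused double loop over range(n)×range(n)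
-- ({i: 0 for i in range(n)} has distinct keys, so the dict is literally that item list).
def build_cv_and_tcr (n : Int) (rel_matrix : List (List Int × String)) (weight_map : List (String × Int)) : List (List Int) × (List (Int × Int)) × (List (Int × Int)) :=
  let cv0 : List (List Int) := (PySem.List.pyRange 0 n 1).map (fun _ => List.replicate n.toNat 0)
  let tcr0 : PySem.Dict Int Int := PySem.Dict.mk ((PySem.List.pyRange 0 n 1).map (fun i => (i, 0)))
  let cnt0 : PySem.Dict Int Int := PySem.Dict.mk ((PySem.List.pyRange 0 n 1).map (fun i => (i, 0)))
  let st := (PySem.List.pyRange 0 n 1).foldl (fun st i =>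
      (PySem.List.pyRange 0 n 1).foldl (fun st j =>
        if i = j then st else
          let rel := pvRelLookup rel_matrix i j
          let w := pvWeightLookup weight_map rel
          (st.1.set i.toNat ((st.1.getD i.toNat []).set j.toNat w),
           st.2.1.modify i 0 (fun v => v + |w|),
           if rel = "A" then st.2.2.modify i 0 (fun v => v + 1) else st.2.2)) st)
    (cv0, tcr0, cnt0)
  (st.1, st.2.1.items, st.2.2.items)

-- ===== PORT B =====
-- value stored in the dict for an arbitrary key (first match, like pvRelLookup)
def pvValLookup (rel_matrix : List (List Int × String)) (p : List Int) : String :=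
  (PySem.Dict.mk rel_matrix).getD p ""

-- the body of Source B's 'for key, rel in rel_matrix.items()' loop: skip keys that are not
-- in-range off-diagonal index pairs, else set the cell and bump the two accumulators.
def pvStepB (n : Int) (weight_map : List (String × Int))
    (st : List (List Int) × PySem.Dict Int Int × PySem.Dict Int Int) (kv : List Int × String) :
    List (List Int) × PySem.Dict Int Int × PySem.Dict Int Int :=
  match kv.1 with
  | [i, j] =>
    if 0 ≤ i ∧ i < n ∧ 0 ≤ j ∧ j < n ∧ i ≠ j then
      let w := pvWeightLookup weight_map kv.2
      (st.1.set i.toNat ((st.1.getD i.toNat []).set j.toNat w),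
       st.2.1.modify i 0 (fun v => v + |w|),
       if kv.2 = "A" then st.2.2.modify i 0 (fun v => v + 1) else st.2.2)
    else st
  | _ => st

-- literal port of Source B: same initialisation as A, then ONE pass over rel_matrix.items()
-- (under the assoc-list dict convention: first-occurrence keys with their first values).
def build_cv_and_tcr_alt (n : Int) (rel_matrix : List (List Int × String)) (weight_map : List (String × Int)) : List (List Int) × (List (Int × Int)) × (List (Int × Int)) :=
  let cv0 : List (List Int) := (PySem.List.pyRange 0 n 1).map (fun _ => List.replicate n.toNat 0)
  let tcr0 : PySem.Dict Int Int := PySem.Dict.mk ((PySem.List.pyRange 0 n 1).map (fun i => (i, 0)))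
  let cnt0 : PySem.Dict Int Int := PySem.Dict.mk ((PySem.List.pyRange 0 n 1).map (fun i => (i, 0)))
  let items := (PySem.List.dedup (rel_matrix.map Prod.fst)).map (fun k => (k, pvValLookup rel_matrix k))
  let st := items.foldl (pvStepB n weight_map) (cv0, tcr0, cnt0)
  (st.1, st.2.1.items, st.2.2.items)

-- ===== PRECONDITION & SPEC =====
-- pvIsReq n p: p is a key A's loop looks up — an in-range off-diagonal index pair [i, j].
def pvIsReq (n : Int) (p : List Int) : Bool :=
  match p with
  | [i, j] => decide (0 ≤ i ∧ i < n ∧ 0 ≤ j ∧ j < n ∧ i ≠ j)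
  | _ => false

-- Pre_ excludes exactly the inputs where Python A raises KeyError: some off-diagonal pair
-- (i,j) with 0 ≤ i,j < n missing from rel_matrix, or its relation missing from weight_map.
-- (Stated over rel_matrix's distinct keys so deciding it never enumerates range(n)²:
-- all n(n-1) required pairs are covered iff the count of required distinct keys equals n(n-1).)
def Pre_build_cv_and_tcr (n : Int) (rel_matrix : List (List Int × String)) (weight_map : List (String × Int)) : Prop :=
  ((((PySem.List.dedup (rel_matrix.map Prod.fst)).filter (pvIsReq n)).length : Int)
      = max n 0 * (max n 0 - 1))
  ∧ ∀ p ∈ PySem.List.dedup (rel_matrix.map Prod.fst), pvIsReq n p = true →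
      ((((PySem.Dict.mk rel_matrix).get? p).bind
          (fun r => (PySem.Dict.mk weight_map).get? r)).isSome = true)
instance (n : Int) (rel_matrix : List (List Int × String)) (weight_map : List (String × Int)) : Decidable (Pre_build_cv_and_tcr n rel_matrix weight_map) := by unfold Pre_build_cv_and_tcr; infer_instance

def pvWitness_build_cv_and_tcr : Int × (List (List Int × String)) × (List (String × Int)) :=
  (2, [([0, 1], "A"), ([1, 0], "B")], [("A", 5), ("B", 3)])

def Spec_build_cv_and_tcr (n : Int) (rel_matrix : List (List Int × String)) (weight_map : List (String × Int)) (out : List (List Int) × (List (Int × Int)) × (List (Int × Int))) : Prop := out = build_cv_and_tcr_alt n rel_matrix weight_map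
instance (n : Int) (rel_matrix : List (List Int × String)) (weight_map : List (String × Int)) (out : List (List Int) × (List (Int × Int)) × (List (Int × Int))) : Decidable (Spec_build_cv_and_tcr n rel_matrix weight_map out) := by unfold Spec_build_cv_and_tcr; infer_instance

-- ===== CLAIM (what is proved, stated in full; the proofs are below) =====
def Claim_equal_build_cv_and_tcr : Prop := ∀ (n : Int) (rel_matrix : List (List Int × String)) (weight_map : List (String × Int)), Dom_build_cv_and_tcr n rel_matrix weight_map → Pre_build_cv_and_tcr n rel_matrix weight_map → Spec_build_cv_and_tcr n rel_matrix weight_map (build_cv_and_tcr n rel_matrix weight_map)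

-- ===== LEMMAS AND PROOFS =====

-- canonical value both programs compute
def pvRowB (n : Int) (rm : List (List Int × String)) (wm : List (String × Int)) (i : Int) : List Int :=
  (PySem.List.pyRange 0 n 1).map (fun j => if i ≠ j then pvWeightLookup wm (pvRelLookup rm i j) else 0)

def pvS (n : Int) (rm : List (List Int × String)) (wm : List (String × Int)) (i : Int) : Int :=
  ((PySem.List.pyRange 0 n 1).map (fun j => if i = j then 0 else |pvWeightLookup wm (pvRelLookup rm i j)|)).sum

def pvCnt (n : Int) (rm : List (List Int × String)) (i : Int) : Int :=
  ((PySem.List.pyRange 0 n 1).map (fun j => if i = j then 0 else if pvRelLookup rm i j = "A" then (1:Int) else 0)).sum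

def pvCanon (n : Int) (rm : List (List Int × String)) (wm : List (String × Int)) : List (List Int) × (List (Int × Int)) × (List (Int × Int)) :=
  ((PySem.List.pyRange 0 n 1).map (fun i => pvRowB n rm wm i),
   (PySem.List.pyRange 0 n 1).map (fun i => (i, pvS n rm wm i)),
   (PySem.List.pyRange 0 n 1).map (fun i => (i, pvCnt n rm i)))

-- ---------- A side: the fused double loop computes pvCanon ----------
def pvF (rm : List (List Int × String)) (wm : List (String × Int)) (i : Int) : List (List Int) → Int → List (List Int) :=
  fun cv j => if i = j then cv else cv.set i.toNat ((cv.getD i.toNat []).set j.toNat (pvWeightLookup wm (pvRelLookup rm i j)))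

def pvG (rm : List (List Int × String)) (wm : List (String × Int)) (i : Int) : PySem.Dict Int Int → Int → PySem.Dict Int Int :=
  fun t j => if i = j then t else t.modify i 0 (fun v => v + |pvWeightLookup wm (pvRelLookup rm i j)|)

def pvH (rm : List (List Int × String)) (i : Int) : PySem.Dict Int Int → Int → PySem.Dict Int Int :=
  fun c j => if i = j then c else if pvRelLookup rm i j = "A" then c.modify i 0 (fun v => v + 1) else c

lemma pv_foldl_prod3 {α β γ δ : Type} (js : List δ) (f : α → δ → α) (g : β → δ → β) (h : γ → δ → γ) (st : α × β × γ) :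
    js.foldl (fun st j => (f st.1 j, g st.2.1 j, h st.2.2 j)) st = (js.foldl f st.1, js.foldl g st.2.1, js.foldl h st.2.2) := by
  induction js generalizing st with
  | nil => rfl
  | cons x xs ih => simpa using ih (f st.1 x, g st.2.1 x, h st.2.2 x)

lemma pv_step_eta (rm : List (List Int × String)) (wm : List (String × Int)) (i : Int) :
    (fun (st : List (List Int) × PySem.Dict Int Int × PySem.Dict Int Int) (j : Int) =>
      if i = j then st else
        (st.1.set i.toNat ((st.1.getD i.toNat []).set j.toNat (pvWeightLookup wm (pvRelLookup rm i j))),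
         st.2.1.modify i 0 (fun v => v + |pvWeightLookup wm (pvRelLookup rm i j)|),
         if pvRelLookup rm i j = "A" then st.2.2.modify i 0 (fun v => v + 1) else st.2.2))
    = fun st j => (pvF rm wm i st.1 j, pvG rm wm i st.2.1 j, pvH rm i st.2.2 j) := by
  funext st j
  by_cases h : i = j <;> simp [pvF, pvG, pvH, h]

def pvFO (rm : List (List Int × String)) (wm : List (String × Int)) (n : Int) : List (List Int) → Int → List (List Int) :=
  fun cv i => (PySem.List.pyRange 0 n 1).foldl (pvF rm wm i) cv

def pvGO (rm : List (List Int × String)) (wm : List (String × Int)) (n : Int) : PySem.Dict Int Int → Int → PySem.Dict Int Int :=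
  fun t i => (PySem.List.pyRange 0 n 1).foldl (pvG rm wm i) t

def pvHO (rm : List (List Int × String)) (n : Int) : PySem.Dict Int Int → Int → PySem.Dict Int Int :=
  fun c i => (PySem.List.pyRange 0 n 1).foldl (pvH rm i) c

lemma pv_outer_eta (rm : List (List Int × String)) (wm : List (String × Int)) (n : Int) :
    (fun (st : List (List Int) × PySem.Dict Int Int × PySem.Dict Int Int) (i : Int) =>
      ((PySem.List.pyRange 0 n 1).foldl (pvF rm wm i) st.1,
       (PySem.List.pyRange 0 n 1).foldl (pvG rm wm i) st.2.1,
       (PySem.List.pyRange 0 n 1).foldl (pvH rm i) st.2.2))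
    = fun st i => (pvFO rm wm n st.1 i, pvGO rm wm n st.2.1 i, pvHO rm n st.2.2 i) := rfl

lemma pv_cv_extract (rm : List (List Int × String)) (wm : List (String × Int)) (i : Int) :
    ∀ (js : List Int) (cv : List (List Int)), i.toNat < cv.length →
    js.foldl (pvF rm wm i) cv
      = cv.set i.toNat (js.foldl (fun r j => if i = j then r else r.set j.toNat (pvWeightLookup wm (pvRelLookup rm i j))) (cv.getD i.toNat [])) := by
  intro js
  induction js with
  | nil =>
    intro cv h
    simp [List.getD_eq_getElem?_getD, List.getElem?_eq_getElem h, List.set_getElem_self]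
  | cons x xs ih =>
    intro cv h
    by_cases hx : i = x
    · simpa [pvF, hx] using ih cv h
    · have hlen : i.toNat < (cv.set i.toNat ((cv.getD i.toNat []).set x.toNat (pvWeightLookup wm (pvRelLookup rm i x)))).length := by
        simpa using h
      have hget : (cv.set i.toNat ((cv.getD i.toNat []).set x.toNat (pvWeightLookup wm (pvRelLookup rm i x)))).getD i.toNat []
          = (cv.getD i.toNat []).set x.toNat (pvWeightLookup wm (pvRelLookup rm i x)) := by
        simp [List.getD_eq_getElem?_getD, h]
      simp only [List.foldl_cons, pvF, if_neg hx]
      rw [ih _ hlen, hget, List.set_set]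

lemma pv_rowfold (n : Int) (rm : List (List Int × String)) (wm : List (String × Int)) (i : Int) :
    ∀ m : Int, 0 ≤ m → m ≤ n →
    (PySem.List.pyRange 0 m 1).foldl (fun r j => if i = j then r else r.set j.toNat (pvWeightLookup wm (pvRelLookup rm i j))) (List.replicate n.toNat 0)
      = (PySem.List.pyRange 0 n 1).map (fun j => if j < m ∧ i ≠ j then pvWeightLookup wm (pvRelLookup rm i j) else 0) := by
  intro m hm
  induction m, hm using Int.le_induction with
  | base =>
    intro _
    rw [PySem.List.pyRange_one_eq_nil le_rfl]
    apply List.ext_getElem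
    · simp [PySem.List.length_pyRange_one]
    · intro t ht1 ht2
      have hlt : t < (PySem.List.pyRange 0 n 1).length := by simpa using ht2
      have hel : (PySem.List.pyRange 0 n 1)[t] = 0 + (t:Int) := PySem.List.getElem_pyRange_one _ _ _ _
      simp only [List.foldl_nil, List.getElem_replicate, List.getElem_map, hel]
      rw [if_neg (by omega)]
  | succ k hk ihk =>
    intro hkn
    have ih := ihk (by omega)
    rw [PySem.List.pyRange_one_succ_right hk, List.foldl_append, ih]
    simp only [List.foldl_cons, List.foldl_nil]
    by_cases hik : i = k
    · subst hik
      rw [if_pos rfl]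
      apply List.map_congr_left
      intro j hj
      have hj' := PySem.List.mem_pyRange_one.mp hj
      by_cases h1 : j < i ∧ i ≠ j
      · rw [if_pos h1, if_pos ⟨by omega, h1.2⟩]
      · rw [if_neg h1, if_neg (by omega)]
    · rw [if_neg hik]
      apply List.ext_getElem
      · simp
      · intro t ht1 ht2
        have hlt : t < (PySem.List.pyRange 0 n 1).length := by simpa using ht2
        have hel : (PySem.List.pyRange 0 n 1)[t] = 0 + (t:Int) := PySem.List.getElem_pyRange_one _ _ _ _
        rw [List.getElem_set, List.getElem_map, List.getElem_map, hel]
        by_cases hkt : k.toNat = t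
        · rw [if_pos hkt]
          have : (0:Int) + (t:Int) = k := by omega
          rw [this, if_pos ⟨by omega, hik⟩]
        · rw [if_neg hkt]
          have hne : (0:Int) + (t:Int) ≠ k := by omega
          by_cases h1 : 0 + (t:Int) < k ∧ i ≠ 0 + (t:Int)
          · rw [if_pos h1, if_pos ⟨by omega, h1.2⟩]
          · rw [if_neg h1, if_neg (by omega)]

lemma pv_tcrfold (rm : List (List Int × String)) (wm : List (String × Int)) (i : Int) :
    ∀ (js : List Int) (t : PySem.Dict Int Int), i ∈ t.keys →
    ((js.foldl (pvG rm wm i) t).keys = t.keys ∧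
     ∀ k, (js.foldl (pvG rm wm i) t).getD k 0
        = t.getD k 0 + if k = i then ((js.map (fun j => if i = j then 0 else |pvWeightLookup wm (pvRelLookup rm i j)|)).sum) else 0) := by
  intro js
  induction js with
  | nil => intro t ht; constructor
           · rfl
           · intro k; by_cases hk : k = i <;> simp [hk]
  | cons x xs ih =>
    intro t ht
    by_cases hx : i = x
    · have := ih t ht
      constructor
      · simpa [pvG, hx] using this.1
      · intro k
        have h2 := this.2 k
        by_cases hk : k = i <;> simp [pvG, hx, hk] at h2 ⊢ <;> simpa [hx] using h2
    · have hcont : t.contains i = true := (PySem.Dict.contains_iff_mem_keys _ _).mpr ht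
      have hkeys : (t.modify i 0 (fun v => v + |pvWeightLookup wm (pvRelLookup rm i x)|)).keys = t.keys := by
        rw [PySem.Dict.keys_modify, PySem.Dict.keys_insert_of_contains _ _ hcont]
      have hmem : i ∈ (t.modify i 0 (fun v => v + |pvWeightLookup wm (pvRelLookup rm i x)|)).keys := by
        rw [hkeys]; exact ht
      have := ih _ hmem
      constructor
      · simp only [List.foldl_cons, pvG, if_neg hx]
        rw [this.1, hkeys]
      · intro k
        have h2 := this.2 k
        simp only [List.foldl_cons, pvG, if_neg hx] at h2 ⊢
        rw [h2, PySem.Dict.getD_modify]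
        by_cases hk : k = i
        · subst hk; simp [if_neg hx]; ring
        · simp [hk]

lemma pv_cntfold (rm : List (List Int × String)) (i : Int) :
    ∀ (js : List Int) (c : PySem.Dict Int Int), i ∈ c.keys →
    ((js.foldl (pvH rm i) c).keys = c.keys ∧
     ∀ k, (js.foldl (pvH rm i) c).getD k 0
        = c.getD k 0 + if k = i then ((js.map (fun j => if i = j then 0 else if pvRelLookup rm i j = "A" then (1:Int) else 0)).sum) else 0) := by
  intro js
  induction js with
  | nil => intro c hc; constructor
           · rfl
           · intro k; by_cases hk : k = i <;> simp [hk]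
  | cons x xs ih =>
    intro c hc
    by_cases hx : i = x
    · have := ih c hc
      constructor
      · simpa [pvH, hx] using this.1
      · intro k
        have h2 := this.2 k
        by_cases hk : k = i <;> simp [pvH, hx, hk] at h2 ⊢ <;> simpa [hx] using h2
    · by_cases hA : pvRelLookup rm i x = "A"
      · have hcont : c.contains i = true := (PySem.Dict.contains_iff_mem_keys _ _).mpr hc
        have hkeys : (c.modify i 0 (fun v => v + 1)).keys = c.keys := by
          rw [PySem.Dict.keys_modify, PySem.Dict.keys_insert_of_contains _ _ hcont]
        have hmem : i ∈ (c.modify i 0 (fun v => v + 1)).keys := by rw [hkeys]; exact hc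
        have := ih _ hmem
        constructor
        · simp only [List.foldl_cons, pvH, if_neg hx, if_pos hA]
          rw [this.1, hkeys]
        · intro k
          have h2 := this.2 k
          simp only [List.foldl_cons, pvH, if_neg hx, if_pos hA] at h2 ⊢
          rw [h2, PySem.Dict.getD_modify]
          by_cases hk : k = i
          · subst hk; simp [if_neg hx, hA]; ring
          · simp [hk]
      · have := ih c hc
        constructor
        · simpa [pvH, hx, hA] using this.1
        · intro k
          have h2 := this.2 k
          simp only [List.foldl_cons, pvH, if_neg hx, if_neg hA] at h2 ⊢
          rw [h2]
          by_cases hk : k = i <;> simp [hk, hx, hA]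

lemma pv_mkzero_getD (l : List Int) (k : Int) :
    (PySem.Dict.mk (l.map (fun i => (i, (0:Int))))).getD k 0 = 0 := by
  induction l with
  | nil => simp [PySem.Dict.getD_eq_get?_getD, PySem.Dict.get?]
  | cons x xs ih =>
    rw [PySem.Dict.getD_eq_get?_getD] at ih ⊢
    simp only [List.map_cons, PySem.Dict.get?_mk_cons]
    by_cases hx : (x == k) = true <;> simp [hx, ih]

lemma pv_mk_keys (l : List Int) :
    (PySem.Dict.mk (l.map (fun i => (i, (0:Int))))).keys = l := by
  simp only [PySem.Dict.keys, List.map_map]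
  rw [show ((fun x : Int × Int => x.1) ∘ fun i : Int => (i, (0:Int))) = id from rfl, List.map_id]

lemma pv_getD_map_row (n : Int) (f : Int → List Int) (m : Int) (h0 : 0 ≤ m) (h1 : m < n) :
    ((PySem.List.pyRange 0 n 1).map f).getD m.toNat [] = f m := by
  have hlt : m.toNat < (PySem.List.pyRange 0 n 1).length := by
    rw [PySem.List.length_pyRange_one]; omega
  rw [List.getD_eq_getElem?_getD, List.getElem?_eq_getElem (by simpa using hlt)]
  simp only [List.getElem_map, Option.getD_some]
  congr 1
  rw [PySem.List.getElem_pyRange_one]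
  omega

lemma pv_outer_cv (n : Int) (rm : List (List Int × String)) (wm : List (String × Int)) :
    ∀ m : Int, 0 ≤ m → m ≤ n →
    (PySem.List.pyRange 0 m 1).foldl (fun cv i => (PySem.List.pyRange 0 n 1).foldl (pvF rm wm i) cv)
        ((PySem.List.pyRange 0 n 1).map (fun _ => List.replicate n.toNat 0))
      = (PySem.List.pyRange 0 n 1).map (fun i => if i < m then pvRowB n rm wm i else List.replicate n.toNat 0) := by
  intro m hm
  induction m, hm using Int.le_induction with
  | base =>
    intro _
    rw [PySem.List.pyRange_one_eq_nil le_rfl]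
    simp only [List.foldl_nil]
    apply List.map_congr_left
    intro i hi
    have := PySem.List.mem_pyRange_one.mp hi
    rw [if_neg (by omega)]
  | succ k hk ihk =>
    intro hkn
    have ih := ihk (by omega)
    rw [PySem.List.pyRange_one_succ_right hk, List.foldl_append, ih]
    simp only [List.foldl_cons, List.foldl_nil]
    have hlen : k.toNat < ((PySem.List.pyRange 0 n 1).map (fun i => if i < k then pvRowB n rm wm i else List.replicate n.toNat 0)).length := by
      simp [PySem.List.length_pyRange_one]; omega
    rw [pv_cv_extract rm wm k _ _ hlen]
    rw [pv_getD_map_row n _ k hk (by omega)]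
    rw [if_neg (by omega)]
    rw [pv_rowfold n rm wm k n (by omega) le_rfl]
    apply List.ext_getElem
    · simp
    · intro t ht1 ht2
      have hlt : t < (PySem.List.pyRange 0 n 1).length := by simpa using ht2
      have hel : (PySem.List.pyRange 0 n 1)[t] = 0 + (t:Int) := PySem.List.getElem_pyRange_one _ _ _ _
      rw [List.getElem_set, List.getElem_map, List.getElem_map, hel]
      by_cases hkt : k.toNat = t
      · rw [if_pos hkt]
        have hkk : (0:Int) + (t:Int) = k := by omega
        rw [hkk, if_pos (by omega)]
        unfold pvRowB
        apply List.map_congr_left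
        intro j hj
        have hj' := PySem.List.mem_pyRange_one.mp hj
        by_cases h1 : j < n ∧ k ≠ j
        · rw [if_pos h1, if_pos h1.2]
        · rw [if_neg h1, if_neg (by omega)]
      · rw [if_neg hkt]
        by_cases h1 : 0 + (t:Int) < k
        · rw [if_pos h1, if_pos (by omega)]
        · rw [if_neg h1, if_neg (by omega)]

lemma pv_outer_dict (n : Int) (step : Int → PySem.Dict Int Int → Int → PySem.Dict Int Int) (val : Int → Int)
    (hstep : ∀ (i : Int) (t : PySem.Dict Int Int), i ∈ t.keys →
      (((PySem.List.pyRange 0 n 1).foldl (step i) t).keys = t.keys ∧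
       ∀ k, ((PySem.List.pyRange 0 n 1).foldl (step i) t).getD k 0 = t.getD k 0 + if k = i then val i else 0)) :
    ∀ m : Int, 0 ≤ m → m ≤ n →
    (((PySem.List.pyRange 0 m 1).foldl (fun t i => (PySem.List.pyRange 0 n 1).foldl (step i) t)
        (PySem.Dict.mk ((PySem.List.pyRange 0 n 1).map (fun i => (i, 0))))).keys = PySem.List.pyRange 0 n 1 ∧
     ∀ k, ((PySem.List.pyRange 0 m 1).foldl (fun t i => (PySem.List.pyRange 0 n 1).foldl (step i) t)
        (PySem.Dict.mk ((PySem.List.pyRange 0 n 1).map (fun i => (i, 0))))).getD k 0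
        = if 0 ≤ k ∧ k < m then val k else 0) := by
  intro m hm
  induction m, hm using Int.le_induction with
  | base =>
    intro _
    rw [PySem.List.pyRange_one_eq_nil le_rfl]
    constructor
    · simpa using pv_mk_keys (PySem.List.pyRange 0 n 1)
    · intro k
      simp only [List.foldl_nil]
      rw [pv_mkzero_getD, if_neg (by omega)]
  | succ m hm ihm =>
    intro hmn
    have ih := ihm (by omega)
    rw [PySem.List.pyRange_one_succ_right hm, List.foldl_append]
    simp only [List.foldl_cons, List.foldl_nil]
    set u := (PySem.List.pyRange 0 m 1).foldl (fun t i => (PySem.List.pyRange 0 n 1).foldl (step i) t)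
        (PySem.Dict.mk ((PySem.List.pyRange 0 n 1).map (fun i => (i, 0)))) with hu
    have hmem : m ∈ u.keys := by
      rw [ih.1]
      exact PySem.List.mem_pyRange_one.mpr ⟨hm, by omega⟩
    have hs := hstep m u hmem
    constructor
    · rw [hs.1, ih.1]
    · intro k
      rw [hs.2 k, ih.2 k]
      by_cases hk : k = m
      · subst hk
        rw [if_neg (by omega), if_pos rfl, if_pos (by omega)]
        ring
      · rw [if_neg hk]
        by_cases h1 : 0 ≤ k ∧ k < m
        · rw [if_pos h1, if_pos (by omega)]
          ring
        · rw [if_neg h1, if_neg (by omega)]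
          ring

lemma pvA_canon (n : Int) (rm : List (List Int × String)) (wm : List (String × Int)) :
    build_cv_and_tcr n rm wm = pvCanon n rm wm := by
  unfold pvCanon
  by_cases hn : 0 ≤ n
  · have e1 : (PySem.List.pyRange 0 n 1).foldl (pvFO rm wm n)
        ((PySem.List.pyRange 0 n 1).map (fun _ => List.replicate n.toNat 0))
        = (PySem.List.pyRange 0 n 1).map (fun i => pvRowB n rm wm i) := by
      have h : (PySem.List.pyRange 0 n 1).foldl (pvFO rm wm n)
          ((PySem.List.pyRange 0 n 1).map (fun _ => List.replicate n.toNat 0))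
          = (PySem.List.pyRange 0 n 1).map (fun i => if i < n then pvRowB n rm wm i else List.replicate n.toNat 0) :=
        pv_outer_cv n rm wm n hn le_rfl
      rw [h]
      apply List.map_congr_left
      intro i hi
      have := PySem.List.mem_pyRange_one.mp hi
      rw [if_pos (by omega)]
    · have ht := pv_outer_dict n (pvG rm wm) (pvS n rm wm)
        (fun i t hmem => pv_tcrfold rm wm i (PySem.List.pyRange 0 n 1) t hmem) n hn le_rfl
      have ht1 : ((PySem.List.pyRange 0 n 1).foldl (pvGO rm wm n)
          (PySem.Dict.mk ((PySem.List.pyRange 0 n 1).map (fun i => (i, 0))))).keys = PySem.List.pyRange 0 n 1 := ht.1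
      have ht2 : ∀ k, ((PySem.List.pyRange 0 n 1).foldl (pvGO rm wm n)
          (PySem.Dict.mk ((PySem.List.pyRange 0 n 1).map (fun i => (i, 0))))).getD k 0
          = if 0 ≤ k ∧ k < n then pvS n rm wm k else 0 := ht.2
      have e2 : ((PySem.List.pyRange 0 n 1).foldl (pvGO rm wm n)
          (PySem.Dict.mk ((PySem.List.pyRange 0 n 1).map (fun i => (i, 0))))).items
          = (PySem.List.pyRange 0 n 1).map (fun i => (i, pvS n rm wm i)) := by
        rw [PySem.Dict.items_eq_map_keys _ (by rw [ht1]; exact PySem.List.nodup_pyRange_one 0 n) 0, ht1]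
        apply List.map_congr_left
        intro k hk
        have := PySem.List.mem_pyRange_one.mp hk
        rw [ht2 k, if_pos (by omega)]
      have hc := pv_outer_dict n (pvH rm) (pvCnt n rm)
        (fun i c hmem => pv_cntfold rm i (PySem.List.pyRange 0 n 1) c hmem) n hn le_rfl
      have hc1 : ((PySem.List.pyRange 0 n 1).foldl (pvHO rm n)
          (PySem.Dict.mk ((PySem.List.pyRange 0 n 1).map (fun i => (i, 0))))).keys = PySem.List.pyRange 0 n 1 := hc.1
      have hc2 : ∀ k, ((PySem.List.pyRange 0 n 1).foldl (pvHO rm n)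
          (PySem.Dict.mk ((PySem.List.pyRange 0 n 1).map (fun i => (i, 0))))).getD k 0
          = if 0 ≤ k ∧ k < n then pvCnt n rm k else 0 := hc.2
      have e3 : ((PySem.List.pyRange 0 n 1).foldl (pvHO rm n)
          (PySem.Dict.mk ((PySem.List.pyRange 0 n 1).map (fun i => (i, 0))))).items
          = (PySem.List.pyRange 0 n 1).map (fun i => (i, pvCnt n rm i)) := by
        rw [PySem.Dict.items_eq_map_keys _ (by rw [hc1]; exact PySem.List.nodup_pyRange_one 0 n) 0, hc1]
        apply List.map_congr_left
        intro k hk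
        have := PySem.List.mem_pyRange_one.mp hk
        rw [hc2 k, if_pos (by omega)]
      simp only [build_cv_and_tcr, pv_step_eta, pv_outer_eta, pv_foldl_prod3]
      exact Prod.ext e1 (Prod.ext e2 e3)
  · have hnil : PySem.List.pyRange 0 n 1 = [] := PySem.List.pyRange_one_eq_nil (by omega)
    simp [build_cv_and_tcr, hnil]

-- ---------- B side: the data-driven pass over the dict entries computes pvCanon ----------
def pvReqK (n : Int) (L : List (List Int × String)) : List (List Int) :=
  (L.map Prod.fst).filter (pvIsReq n)

def pvContrib (f : Int → Int → Int) (k : Int) (p : List Int) : Int :=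
  match p with
  | [i, j] => if i = k then f i j else 0
  | _ => 0

def pvSumP (f : Int → Int → Int) (K : List (List Int)) (k : Int) : Int :=
  (K.map (pvContrib f k)).sum

def pvFT (rm : List (List Int × String)) (wm : List (String × Int)) (i j : Int) : Int :=
  |pvWeightLookup wm (pvRelLookup rm i j)|

def pvFC (rm : List (List Int × String)) (i j : Int) : Int :=
  if pvRelLookup rm i j = "A" then 1 else 0

def pvCvSpec (n : Int) (rm : List (List Int × String)) (wm : List (String × Int)) (K : List (List Int)) : List (List Int) :=
  (PySem.List.pyRange 0 n 1).map (fun i => (PySem.List.pyRange 0 n 1).map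
    (fun j => if i ≠ j ∧ [i, j] ∈ K then pvWeightLookup wm (pvRelLookup rm i j) else 0))

lemma pv_sumP_append (f : Int → Int → Int) (K : List (List Int)) (p : List Int) (k : Int) :
    pvSumP f (K ++ [p]) k = pvSumP f K k + pvContrib f k p := by
  simp [pvSumP]

lemma pv_cvset (n : Int) (rm : List (List Int × String)) (wm : List (String × Int)) (K : List (List Int))
    (i j : Int) (h1 : 0 ≤ i) (h2 : i < n) (h3 : 0 ≤ j) (_h4 : j < n) (h5 : i ≠ j) :
    (pvCvSpec n rm wm K).set i.toNat
        (((pvCvSpec n rm wm K).getD i.toNat []).set j.toNat (pvWeightLookup wm (pvRelLookup rm i j)))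
      = pvCvSpec n rm wm (K ++ [[i, j]]) := by
  unfold pvCvSpec
  rw [pv_getD_map_row n _ i h1 h2]
  apply List.ext_getElem
  · simp
  · intro t ht1 ht2
    have hlt : t < (PySem.List.pyRange 0 n 1).length := by simpa using ht2
    have hel : (PySem.List.pyRange 0 n 1)[t] = 0 + (t:Int) := PySem.List.getElem_pyRange_one _ _ _ _
    rw [List.getElem_set]
    by_cases hti : i.toNat = t
    · rw [if_pos hti, List.getElem_map, hel]
      have hit : (0:Int) + (t:Int) = i := by omega
      rw [hit]
      apply List.ext_getElem
      · simp
      · intro u hu1 hu2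
        have hlu : u < (PySem.List.pyRange 0 n 1).length := by simpa using hu2
        have helu : (PySem.List.pyRange 0 n 1)[u] = 0 + (u:Int) := PySem.List.getElem_pyRange_one _ _ _ _
        rw [List.getElem_set]
        by_cases hju : j.toNat = u
        · rw [if_pos hju, List.getElem_map, helu]
          have huj : (0:Int) + (u:Int) = j := by omega
          rw [huj, if_pos ⟨h5, by simp⟩]
        · rw [if_neg hju, List.getElem_map, List.getElem_map, helu]
          have hne : (0:Int) + (u:Int) ≠ j := by omega
          have hiff : (i ≠ 0 + (u:Int) ∧ [i, 0 + (u:Int)] ∈ K ++ [[i, j]])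
              ↔ (i ≠ 0 + (u:Int) ∧ [i, 0 + (u:Int)] ∈ K) := by
            constructor
            · rintro ⟨ha, hb⟩
              rcases List.mem_append.mp hb with hb | hb
              · exact ⟨ha, hb⟩
              · simp at hb; omega
            · rintro ⟨ha, hb⟩
              exact ⟨ha, List.mem_append.mpr (Or.inl hb)⟩
          simp only [hiff]
    · rw [if_neg hti, List.getElem_map, List.getElem_map, hel]
      have hne : (0:Int) + (t:Int) ≠ i := by omega
      apply List.map_congr_left
      intro u _
      have hiff : (0 + (t:Int) ≠ u ∧ [0 + (t:Int), u] ∈ K ++ [[i, j]])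
          ↔ (0 + (t:Int) ≠ u ∧ [0 + (t:Int), u] ∈ K) := by
        constructor
        · rintro ⟨ha, hb⟩
          rcases List.mem_append.mp hb with hb | hb
          · exact ⟨ha, hb⟩
          · simp at hb; omega
        · rintro ⟨ha, hb⟩
          exact ⟨ha, List.mem_append.mpr (Or.inl hb)⟩
      simp only [hiff]

lemma pv_contrib_pair (f : Int → Int → Int) (k i j : Int) :
    pvContrib f k [i, j] = if i = k then f i j else 0 := rfl

lemma pv_fold_inv (n : Int) (rm : List (List Int × String)) (wm : List (String × Int)) :
    ∀ (L : List (List Int × String)), (∀ kv ∈ L, kv.2 = pvValLookup rm kv.1) →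
    ∀ (K : List (List Int)) (cv : List (List Int)) (t c : PySem.Dict Int Int),
    cv = pvCvSpec n rm wm K →
    t.keys = PySem.List.pyRange 0 n 1 → (∀ k, t.getD k 0 = pvSumP (pvFT rm wm) K k) →
    c.keys = PySem.List.pyRange 0 n 1 → (∀ k, c.getD k 0 = pvSumP (pvFC rm) K k) →
    ((L.foldl (pvStepB n wm) (cv, t, c)).1 = pvCvSpec n rm wm (K ++ pvReqK n L)
     ∧ (L.foldl (pvStepB n wm) (cv, t, c)).2.1.keys = PySem.List.pyRange 0 n 1
     ∧ (∀ k, (L.foldl (pvStepB n wm) (cv, t, c)).2.1.getD k 0 = pvSumP (pvFT rm wm) (K ++ pvReqK n L) k)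
     ∧ (L.foldl (pvStepB n wm) (cv, t, c)).2.2.keys = PySem.List.pyRange 0 n 1
     ∧ (∀ k, (L.foldl (pvStepB n wm) (cv, t, c)).2.2.getD k 0 = pvSumP (pvFC rm) (K ++ pvReqK n L) k)) := by
  intro L
  induction L with
  | nil =>
    intro _ K cv t c hcv ht1 ht2 hc1 hc2
    subst hcv
    have h0 : pvReqK n ([] : List (List Int × String)) = [] := rfl
    exact ⟨by rw [List.foldl_nil, h0, List.append_nil], ht1,
           fun k => by rw [List.foldl_nil, h0, List.append_nil]; exact ht2 k, hc1,
           fun k => by rw [List.foldl_nil, h0, List.append_nil]; exact hc2 k⟩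
  | cons kv L' ih =>
    intro hval K cv t c hcv ht1 ht2 hc1 hc2
    obtain ⟨p, v⟩ := kv
    have hval' : ∀ x ∈ L', x.2 = pvValLookup rm x.1 := fun x hx => hval x (List.mem_cons_of_mem _ hx)
    have hvkv : v = pvValLookup rm p := hval (p, v) List.mem_cons_self
    simp only [List.foldl_cons]
    rcases p with _ | ⟨i, _ | ⟨j, _ | ⟨x, rest⟩⟩⟩
    · have hstep : pvStepB n wm (cv, t, c) ([], v) = (cv, t, c) := rfl
      have hreq : pvReqK n (([], v) :: L') = pvReqK n L' := by
        simp [pvReqK, pvIsReq]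
      rw [hstep, hreq]
      exact ih hval' K cv t c hcv ht1 ht2 hc1 hc2
    · have hstep : pvStepB n wm (cv, t, c) ([i], v) = (cv, t, c) := rfl
      have hreq : pvReqK n (([i], v) :: L') = pvReqK n L' := by
        simp [pvReqK, pvIsReq]
      rw [hstep, hreq]
      exact ih hval' K cv t c hcv ht1 ht2 hc1 hc2
    · -- key [i, j]
      have hrel : v = pvRelLookup rm i j := hvkv
      by_cases hb : 0 ≤ i ∧ i < n ∧ 0 ≤ j ∧ j < n ∧ i ≠ j
      · obtain ⟨hb1, hb2, hb3, hb4, hb5⟩ := hb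
        have hstep : pvStepB n wm (cv, t, c) ([i, j], v)
            = (cv.set i.toNat ((cv.getD i.toNat []).set j.toNat (pvWeightLookup wm (pvRelLookup rm i j))),
               t.modify i 0 (fun w => w + |pvWeightLookup wm (pvRelLookup rm i j)|),
               if pvRelLookup rm i j = "A" then c.modify i 0 (fun w => w + 1) else c) := by
          simp only [pvStepB]
          rw [if_pos ⟨hb1, hb2, hb3, hb4, hb5⟩, hrel]
        have hisreq : pvIsReq n [i, j] = true := by
          simp only [pvIsReq, decide_eq_true_eq]
          exact ⟨hb1, hb2, hb3, hb4, hb5⟩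
        have hreq : pvReqK n (([i, j], v) :: L') = [i, j] :: pvReqK n L' := by
          simp [pvReqK, hisreq]
        rw [hstep, hreq]
        have hik : i ∈ PySem.List.pyRange 0 n 1 := PySem.List.mem_pyRange_one.mpr ⟨hb1, by omega⟩
        have htcont : t.contains i = true := (PySem.Dict.contains_iff_mem_keys _ _).mpr (ht1 ▸ hik)
        have ht1' : (t.modify i 0 (fun w => w + |pvWeightLookup wm (pvRelLookup rm i j)|)).keys
            = PySem.List.pyRange 0 n 1 := by
          rw [PySem.Dict.keys_modify, PySem.Dict.keys_insert_of_contains _ _ htcont, ht1]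
        have ht2' : ∀ k, (t.modify i 0 (fun w => w + |pvWeightLookup wm (pvRelLookup rm i j)|)).getD k 0
            = pvSumP (pvFT rm wm) (K ++ [[i, j]]) k := by
          intro k
          rw [PySem.Dict.getD_modify, pv_sumP_append, pv_contrib_pair]
          by_cases hk : k = i
          · subst hk
            rw [if_pos rfl, if_pos rfl, ht2 k]
            simp [pvFT]
          · rw [if_neg hk, if_neg (fun h => hk h.symm), ht2 k]
            ring
        have hccont : c.contains i = true := (PySem.Dict.contains_iff_mem_keys _ _).mpr (hc1 ▸ hik)
        have hc1' : (if pvRelLookup rm i j = "A" then c.modify i 0 (fun w => w + 1) else c).keys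
            = PySem.List.pyRange 0 n 1 := by
          by_cases hA : pvRelLookup rm i j = "A"
          · rw [if_pos hA, PySem.Dict.keys_modify, PySem.Dict.keys_insert_of_contains _ _ hccont, hc1]
          · rw [if_neg hA, hc1]
        have hc2' : ∀ k, (if pvRelLookup rm i j = "A" then c.modify i 0 (fun w => w + 1) else c).getD k 0
            = pvSumP (pvFC rm) (K ++ [[i, j]]) k := by
          intro k
          rw [pv_sumP_append, pv_contrib_pair]
          by_cases hA : pvRelLookup rm i j = "A"
          · rw [if_pos hA, PySem.Dict.getD_modify]
            by_cases hk : k = i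
            · subst hk
              rw [if_pos rfl, if_pos rfl, hc2 k]
              simp [pvFC, hA]
            · rw [if_neg hk, if_neg (fun h => hk h.symm), hc2 k]
              ring
          · rw [if_neg hA, hc2 k]
            by_cases hk : i = k
            · rw [if_pos hk]
              simp [pvFC, hA]
            · rw [if_neg hk]
              ring
        have hcv' : cv.set i.toNat ((cv.getD i.toNat []).set j.toNat (pvWeightLookup wm (pvRelLookup rm i j)))
            = pvCvSpec n rm wm (K ++ [[i, j]]) := by
          rw [hcv]; exact pv_cvset n rm wm K i j hb1 hb2 hb3 hb4 hb5
        have hres := ih hval' (K ++ [[i, j]]) _ _ _ hcv' ht1' ht2' hc1' hc2'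
        simpa [List.append_assoc] using hres
      · have hstep : pvStepB n wm (cv, t, c) ([i, j], v) = (cv, t, c) := by
          simp only [pvStepB]
          rw [if_neg hb]
        have hisreq : pvIsReq n [i, j] = false := by
          simp only [pvIsReq, decide_eq_false_iff_not]
          exact hb
        have hreq : pvReqK n (([i, j], v) :: L') = pvReqK n L' := by
          simp [pvReqK, hisreq]
        rw [hstep, hreq]
        exact ih hval' K cv t c hcv ht1 ht2 hc1 hc2
    · have hstep : pvStepB n wm (cv, t, c) (i :: j :: x :: rest, v) = (cv, t, c) := rfl
      have hreq : pvReqK n ((i :: j :: x :: rest, v) :: L') = pvReqK n L' := by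
        simp [pvReqK, pvIsReq]
      rw [hstep, hreq]
      exact ih hval' K cv t c hcv ht1 ht2 hc1 hc2

lemma pv_contrib_zero (f : Int → Int → Int) (k : Int) (p : List Int) (h : p.head? ≠ some k) :
    pvContrib f k p = 0 := by
  rcases p with _ | ⟨i, _ | ⟨j, _ | ⟨x, r⟩⟩⟩
  · rfl
  · rfl
  · have hik : i ≠ k := by simpa using h
    simp [pvContrib, hik]
  · rfl

lemma pv_sum_head_filter (f : Int → Int → Int) (k : Int) :
    ∀ K : List (List Int), (K.map (pvContrib f k)).sum
      = ((K.filter (fun p => decide (p.head? = some k))).map (pvContrib f k)).sum := by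
  intro K
  induction K with
  | nil => rfl
  | cons p K ih =>
    by_cases h : p.head? = some k
    · simp [h, ih]
    · simp [h, ← ih, pv_contrib_zero f k p h]

lemma pv_sum_ite_filter (k : Int) (g : Int → Int) :
    ∀ l : List Int, ((l.filter (fun j => decide (j ≠ k))).map g).sum
      = (l.map (fun j => if k = j then 0 else g j)).sum := by
  intro l
  induction l with
  | nil => rfl
  | cons x l ih =>
    rw [List.map_cons, List.sum_cons, List.filter_cons]
    by_cases h : x = k
    · rw [if_neg (by simp [h]), ih, if_pos h.symm, zero_add]
    · rw [if_pos (by simp [h]), List.map_cons, List.sum_cons, ih, if_neg (fun hh => h hh.symm)]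

lemma pv_sum_allreq (n : Int) (f : Int → Int → Int) (K : List (List Int)) (hnd : K.Nodup)
    (hmem : ∀ p, p ∈ K ↔ pvIsReq n p = true) (k : Int) (hk1 : 0 ≤ k) (hk2 : k < n) :
    pvSumP f K k = ((PySem.List.pyRange 0 n 1).map (fun j => if k = j then 0 else f k j)).sum := by
  unfold pvSumP
  rw [pv_sum_head_filter]
  have hndT : (((PySem.List.pyRange 0 n 1).filter (fun j => decide (j ≠ k))).map (fun j => [k, j])).Nodup :=
    ((PySem.List.nodup_pyRange_one 0 n).filter _).map (fun a b h => by simpa using h)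
  have hperm : (K.filter (fun p => decide (p.head? = some k))).Perm
      (((PySem.List.pyRange 0 n 1).filter (fun j => decide (j ≠ k))).map (fun j => [k, j])) := by
    refine (List.perm_ext_iff_of_nodup (hnd.filter _) hndT).mpr ?_
    intro p
    simp only [List.mem_filter, List.mem_map, decide_eq_true_eq]
    constructor
    · rintro ⟨hpK, hh⟩
      have hreq := (hmem p).mp hpK
      rcases p with _ | ⟨i, _ | ⟨j, _ | ⟨x, r⟩⟩⟩
      · simp [pvIsReq] at hreq
      · simp [pvIsReq] at hreq
      · have hik : i = k := by simpa using hh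
        subst hik
        simp only [pvIsReq, decide_eq_true_eq] at hreq
        exact ⟨j, ⟨PySem.List.mem_pyRange_one.mpr ⟨hreq.2.2.1, hreq.2.2.2.1⟩,
               fun hh' => hreq.2.2.2.2 hh'.symm⟩, rfl⟩
      · simp [pvIsReq] at hreq
    · rintro ⟨j, ⟨hj1, hj2⟩, rfl⟩
      have hjr := PySem.List.mem_pyRange_one.mp hj1
      refine ⟨(hmem [k, j]).mpr ?_, by simp⟩
      simp only [pvIsReq, decide_eq_true_eq]
      exact ⟨hk1, hk2, hjr.1, hjr.2, Ne.symm hj2⟩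
  rw [(hperm.map _).sum_eq, List.map_map]
  have hcomp : (pvContrib f k ∘ fun j => [k, j]) = fun j => f k j := by
    funext j
    simp [pvContrib]
  rw [hcomp, pv_sum_ite_filter]

lemma pv_RK_eq (n : Int) (rm : List (List Int × String)) :
    pvReqK n ((PySem.List.dedup (rm.map Prod.fst)).map (fun k => (k, pvValLookup rm k)))
      = (PySem.List.dedup (rm.map Prod.fst)).filter (pvIsReq n) := by
  unfold pvReqK
  rw [List.map_map,
      show (Prod.fst ∘ fun k : List Int => (k, pvValLookup rm k)) = id from rfl, List.map_id]

def pvAllReq (n : Int) : List (List Int) :=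
  (PySem.List.pyRange 0 n 1).flatMap
    (fun i => ((PySem.List.pyRange 0 n 1).filter (fun j => decide (j ≠ i))).map (fun j => [i, j]))

lemma pv_mem_allReq (n : Int) (p : List Int) : p ∈ pvAllReq n ↔ pvIsReq n p = true := by
  unfold pvAllReq
  simp only [List.mem_flatMap, List.mem_map, List.mem_filter, decide_eq_true_eq,
             PySem.List.mem_pyRange_one]
  constructor
  · rintro ⟨i, ⟨hi1, hi2⟩, j, ⟨⟨hj1, hj2⟩, hji⟩, rfl⟩
    simp only [pvIsReq, decide_eq_true_eq]
    exact ⟨hi1, hi2, hj1, hj2, Ne.symm hji⟩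
  · intro h
    rcases p with _ | ⟨i, _ | ⟨j, _ | ⟨x, r⟩⟩⟩
    · simp [pvIsReq] at h
    · simp [pvIsReq] at h
    · simp only [pvIsReq, decide_eq_true_eq] at h
      exact ⟨i, ⟨h.1, h.2.1⟩, j, ⟨⟨h.2.2.1, h.2.2.2.1⟩, Ne.symm h.2.2.2.2⟩, rfl⟩
    · simp [pvIsReq] at h

lemma pv_length_allReq (n : Int) : (pvAllReq n).length = n.toNat * (n.toNat - 1) := by
  unfold pvAllReq
  rw [List.length_flatMap]
  have hlen : ∀ i ∈ PySem.List.pyRange 0 n 1,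
      (((PySem.List.pyRange 0 n 1).filter (fun j => decide (j ≠ i))).map (fun j => [i, j])).length
        = n.toNat - 1 := by
    intro i hi
    rw [List.length_map]
    have hf : (PySem.List.pyRange 0 n 1).filter (fun j => decide (j ≠ i))
        = (PySem.List.pyRange 0 n 1).erase i := by
      rw [(PySem.List.nodup_pyRange_one 0 n).erase_eq_filter i]
      congr 1
      funext j
      simp [bne]
      rfl
    rw [hf, List.length_erase_of_mem hi, PySem.List.length_pyRange_one]
    congr 1
    omega
  rw [List.map_congr_left hlen, List.map_const', List.sum_replicate, smul_eq_mul,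
      PySem.List.length_pyRange_one]
  congr 1
  omega

lemma pv_RK_mem (n : Int) (rm : List (List Int × String)) (wm : List (String × Int))
    (hpre : Pre_build_cv_and_tcr n rm wm) :
    ∀ p, p ∈ (PySem.List.dedup (rm.map Prod.fst)).filter (pvIsReq n) ↔ pvIsReq n p = true := by
  have hsub : (PySem.List.dedup (rm.map Prod.fst)).filter (pvIsReq n) ⊆ pvAllReq n :=
    fun p hp => (pv_mem_allReq n p).mpr (List.mem_filter.mp hp).2
  have hnd : ((PySem.List.dedup (rm.map Prod.fst)).filter (pvIsReq n)).Nodup :=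
    (PySem.List.nodup_dedup _).filter _
  have hsp := List.subperm_of_subset hnd hsub
  have hlenRK : ((PySem.List.dedup (rm.map Prod.fst)).filter (pvIsReq n)).length
      = (pvAllReq n).length := by
    have h1 := hpre.1
    have h2 : ((n.toNat : Int)) = max n 0 := Int.ofNat_toNat n
    rw [pv_length_allReq]
    obtain hm | hm := Nat.eq_zero_or_pos n.toNat
    · rw [hm]
      rw [← h2, hm] at h1
      simp only [Nat.cast_zero, zero_mul] at h1
      omega
    · have hc : ((n.toNat * (n.toNat - 1) : Nat) : Int) = max n 0 * (max n 0 - 1) := by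
        rw [Nat.cast_mul, Nat.cast_sub hm, h2]
        norm_num
      rw [← hc] at h1
      exact_mod_cast h1
  have hperm := hsp.perm_of_length_le (le_of_eq hlenRK.symm)
  intro p
  constructor
  · exact fun h => (List.mem_filter.mp h).2
  · intro hreq
    exact hperm.mem_iff.mpr ((pv_mem_allReq n p).mpr hreq)

lemma pv_final_of_char (n : Int) (rm : List (List Int × String)) (wm : List (String × Int))
    (K : List (List Int)) (hnd : K.Nodup) (hmem : ∀ p, p ∈ K ↔ pvIsReq n p = true)
    (cv : List (List Int)) (t c : PySem.Dict Int Int)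
    (e1 : cv = pvCvSpec n rm wm K)
    (e2k : t.keys = PySem.List.pyRange 0 n 1) (e2 : ∀ k, t.getD k 0 = pvSumP (pvFT rm wm) K k)
    (e3k : c.keys = PySem.List.pyRange 0 n 1) (e3 : ∀ k, c.getD k 0 = pvSumP (pvFC rm) K k) :
    (cv, t.items, c.items) = pvCanon n rm wm := by
  unfold pvCanon
  refine Prod.ext ?_ (Prod.ext ?_ ?_)
  · show cv = _
    rw [e1]
    unfold pvCvSpec pvRowB
    apply List.map_congr_left
    intro i hi
    have hir := PySem.List.mem_pyRange_one.mp hi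
    apply List.map_congr_left
    intro j hj
    have hjr := PySem.List.mem_pyRange_one.mp hj
    by_cases hij : i = j
    · simp [hij]
    · have hm : [i, j] ∈ K :=
        (hmem [i, j]).mpr (by
          simp only [pvIsReq, decide_eq_true_eq]
          exact ⟨hir.1, hir.2, hjr.1, hjr.2, hij⟩)
      rw [if_pos ⟨hij, hm⟩, if_pos hij]
  · show t.items = _
    rw [PySem.Dict.items_eq_map_keys t (by rw [e2k]; exact PySem.List.nodup_pyRange_one 0 n) 0, e2k]
    apply List.map_congr_left
    intro k hk
    have hkr := PySem.List.mem_pyRange_one.mp hk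
    rw [e2 k, pv_sum_allreq n (pvFT rm wm) K hnd hmem k hkr.1 hkr.2]
    rfl
  · show c.items = _
    rw [PySem.Dict.items_eq_map_keys c (by rw [e3k]; exact PySem.List.nodup_pyRange_one 0 n) 0, e3k]
    apply List.map_congr_left
    intro k hk
    have hkr := PySem.List.mem_pyRange_one.mp hk
    rw [e3 k, pv_sum_allreq n (pvFC rm) K hnd hmem k hkr.1 hkr.2]
    rfl

lemma pvB_canon (n : Int) (rm : List (List Int × String)) (wm : List (String × Int))
    (hpre : Pre_build_cv_and_tcr n rm wm) :
    build_cv_and_tcr_alt n rm wm = pvCanon n rm wm := by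
  have hval : ∀ kv ∈ (PySem.List.dedup (rm.map Prod.fst)).map (fun k => (k, pvValLookup rm k)),
      kv.2 = pvValLookup rm kv.1 := by
    intro kv hkv
    obtain ⟨k, _, rfl⟩ := List.mem_map.mp hkv
    rfl
  have hcv0 : (PySem.List.pyRange 0 n 1).map (fun _ => List.replicate n.toNat 0)
      = pvCvSpec n rm wm [] := by
    unfold pvCvSpec
    apply List.map_congr_left
    intro i _
    apply List.ext_getElem
    · simp [PySem.List.length_pyRange_one]
    · intro u hu1 hu2
      simp
  have ht0 : ∀ k, (PySem.Dict.mk ((PySem.List.pyRange 0 n 1).map (fun i => (i, (0:Int))))).getD k 0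
      = pvSumP (pvFT rm wm) [] k := fun k => by rw [pv_mkzero_getD]; rfl
  have hc0 : ∀ k, (PySem.Dict.mk ((PySem.List.pyRange 0 n 1).map (fun i => (i, (0:Int))))).getD k 0
      = pvSumP (pvFC rm) [] k := fun k => by rw [pv_mkzero_getD]; rfl
  have h := pv_fold_inv n rm wm
      ((PySem.List.dedup (rm.map Prod.fst)).map (fun k => (k, pvValLookup rm k))) hval
      [] _ _ _ hcv0 (pv_mk_keys _) ht0 (pv_mk_keys _) hc0
  obtain ⟨e1, e2k, e2, e3k, e3⟩ := h
  rw [List.nil_append, pv_RK_eq] at e1 e2 e3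
  have hRKnd : ((PySem.List.dedup (rm.map Prod.fst)).filter (pvIsReq n)).Nodup :=
    (PySem.List.nodup_dedup _).filter _
  have hRKmem := pv_RK_mem n rm wm hpre
  simp only [build_cv_and_tcr_alt]
  exact pv_final_of_char n rm wm _ hRKnd hRKmem _ _ _ e1 e2k e2 e3k e3

-- ===== VERDICT (by name: the statement is the Claim_ definition above) =====
theorem build_cv_and_tcr_spec : Claim_equal_build_cv_and_tcr := by
  intro n rm wm _ hpre
  unfold Spec_build_cv_and_tcr
  exact (pvA_canon n rm wm).trans (pvB_canon n rm wm hpre).symm
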